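-- pv_equiv track=rewrite | github.com/tkwang0530/LeetCode | 1498.py | numSubseq2
-- ===== SOURCE A (Python) =====
-- from typing import List
--
-- def numSubseq2(nums: List[int], target: int) -> int:
--     memo = {}
--     def myPow(x, n, M):
--         if n == 0:
--             return 1
--         if (x, n, M) in memo:
--             return memo[(x, n, M)]
--         ans = x
--         times = 1
--         while times * 2 < n:
--             ans *= ans
--             ans %= M
--             times *= 2
--
--         memo[(x, n, M)] = ans * myPow(x, n - times, M)
--         return memo[(x, n, M)]
--
--     M = 10 ** 9 + 7
--     n = len(nums)
--     nums.sort()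
--     ans = 0
--     left, right = 0, n-1
--     while left <= right:
--         if nums[left] + nums[right] <= target:
--             ans += myPow(2, (right-left), M)
--             left += 1
--         else:
--             right -= 1
--     return ans % M
-- ===== SOURCE B (Python) =====
-- from typing import List
--
-- def numSubseq2(nums: List[int], target: int) -> int:
--     MOD = 10 ** 9 + 7
--     nums.sort()
--     n = len(nums)
--     pow2 = [1]
--     for _ in range(n):
--         pow2.append(pow2[-1] * 2 % MOD)
--     ans = 0
--     left, right = 0, n - 1
--     while left <= right:
--         if nums[left] + nums[right] <= target:
--             ans = (ans + pow2[right - left]) % MOD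
--             left += 1
--         else:
--             right -= 1
--     return ans
-- ===== Notes on version B (the rewrite author's own statement) =====
-- stated objective: faster
-- what changed: The recursive memoized fast-exponentiation helper (dict keyed by (x,n,M), repeated-squaring loop plus recursion) is replaced by an up-front power-of-two table built by linear repeated doubling, so the sweep does one list lookup per step and keeps the accumulator reduced mod 1e9+7; same in-place sort and two-pointer sweep.
import Mathlib
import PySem

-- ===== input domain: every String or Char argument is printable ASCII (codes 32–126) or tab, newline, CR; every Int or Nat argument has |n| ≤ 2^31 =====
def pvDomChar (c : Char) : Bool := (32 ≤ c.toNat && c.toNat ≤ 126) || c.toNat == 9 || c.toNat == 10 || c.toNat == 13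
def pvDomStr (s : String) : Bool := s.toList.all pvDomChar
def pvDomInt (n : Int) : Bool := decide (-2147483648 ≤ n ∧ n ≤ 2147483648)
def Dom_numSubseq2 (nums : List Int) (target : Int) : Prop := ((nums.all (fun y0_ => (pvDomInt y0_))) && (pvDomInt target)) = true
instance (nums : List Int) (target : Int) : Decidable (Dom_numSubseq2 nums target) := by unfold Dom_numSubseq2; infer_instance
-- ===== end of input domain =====

-- B replaces A's recursive memoized fast-exponentiation helper by a precomputed power-of-two
-- table (simpler); both sort nums in place in Python — the equivalence proved is about the
-- RETURN value (both perform the same sort mutation).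

-- ===== PORT A =====
-- the `while times * 2 < n: ans *= ans; ans %= M; times *= 2` loop of myPow
def powLoopA (n M ans times : Int) (ht : 0 < times) : Int × Int :=
  if h : times * 2 < n then
    powLoopA n M (PySem.Int.mod (ans * ans) M) (times * 2) (by omega)
  else
    (ans, times)
termination_by (n - times).toNat
decreasing_by omega

-- myPow with the shared memo dict threaded through; fuel makes the recursion total
-- (every call site supplies fuel > n.toNat, enough since n strictly decreases)
def myPowA (fuel : Nat) (x n M : Int) (memo : PySem.Dict (Int × Int × Int) Int) :
    Int × PySem.Dict (Int × Int × Int) Int :=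
  match fuel with
  | 0 => (0, memo)
  | fuel + 1 =>
    if n = 0 then (1, memo)
    else
      match memo.get? (x, n, M) with
      | some v => (v, memo)
      | none =>
        let p := powLoopA n M x 1 (by norm_num)
        let r := myPowA fuel x (n - p.2) M memo
        (p.1 * r.1, r.2.insert (x, n, M) (p.1 * r.1))

-- the two-pointer `while left <= right` loop of A
def loopA (nums : List Int) (target M left right ans : Int)
    (memo : PySem.Dict (Int × Int × Int) Int) : Int :=
  if h : left ≤ right then
    if (PySem.List.pyGet? nums left).getD 0 + (PySem.List.pyGet? nums right).getD 0 ≤ target then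
      let pr := myPowA ((right - left).toNat + 1) 2 (right - left) M memo
      loopA nums target M (left + 1) right (ans + pr.1) pr.2
    else
      loopA nums target M left (right - 1) ans memo
  else ans
termination_by (right - left + 1).toNat
decreasing_by all_goals omega

def numSubseq2 (nums : List Int) (target : Int) : Int :=
  let M : Int := 10 ^ 9 + 7
  let n : Int := nums.length
  let s := PySem.List.sorted nums (fun x => x) false
  PySem.Int.mod (loopA s target M 0 (n - 1) 0 PySem.Dict.empty) M

-- ===== PORT B =====
-- pow2 = [1]; for _ in range(n): pow2.append(pow2[-1] * 2 % MOD)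
def pow2Table (n : Nat) (M : Int) : List Int :=
  (PySem.List.pyRange 0 (n : Int) 1).foldl
    (fun acc _ => acc ++ [PySem.Int.mod (((PySem.List.pyGet? acc (-1)).getD 0) * 2) M]) [1]

-- the two-pointer `while left <= right` loop of B (accumulator kept reduced mod M)
def loopB (nums : List Int) (target M : Int) (pow2 : List Int) (left right ans : Int) : Int :=
  if h : left ≤ right then
    if (PySem.List.pyGet? nums left).getD 0 + (PySem.List.pyGet? nums right).getD 0 ≤ target then
      loopB nums target M pow2 (left + 1) right
        (PySem.Int.mod (ans + (PySem.List.pyGet? pow2 (right - left)).getD 0) M)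
    else
      loopB nums target M pow2 left (right - 1) ans
  else ans
termination_by (right - left + 1).toNat
decreasing_by all_goals omega

def numSubseq2_alt (nums : List Int) (target : Int) : Int :=
  let M : Int := 10 ^ 9 + 7
  let s := PySem.List.sorted nums (fun x => x) false
  let n := s.length
  loopB s target M (pow2Table n M) 0 ((n : Int) - 1) 0

-- ===== PRECONDITION & SPEC =====
def Spec_numSubseq2 (nums : List Int) (target : Int) (out : Int) : Prop := out = numSubseq2_alt nums target
instance (nums : List Int) (target : Int) (out : Int) : Decidable (Spec_numSubseq2 nums target out) := by unfold Spec_numSubseq2; infer_instance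

-- ===== CLAIM (what is proved, stated in full; the proofs are below) =====
def Claim_equal_numSubseq2 : Prop := ∀ (nums : List Int) (target : Int), Dom_numSubseq2 nums target → Spec_numSubseq2 nums target (numSubseq2 nums target)

-- ===== LEMMAS AND PROOFS =====

-- every memo entry with key (x, n, M), n ≥ 0, stores a value congruent to x^n mod M
def GoodMemo (memo : PySem.Dict (Int × Int × Int) Int) : Prop :=
  ∀ x n M v, memo.get? (x, n, M) = some v → 0 ≤ n → v % M = x ^ n.toNat % M

lemma goodMemo_empty : GoodMemo PySem.Dict.empty := by
  intro x n M v h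
  simp [PySem.Dict.get?_empty] at h

lemma powLoopA_spec (x : Int) (n M ans times : Int) (ht : 0 < times) (hM : 0 < M)
    (hle : times ≤ n)
    (hans : ans % M = x ^ times.toNat % M) :
    (powLoopA n M ans times ht).1 % M = x ^ ((powLoopA n M ans times ht).2).toNat % M ∧
    0 < (powLoopA n M ans times ht).2 ∧ (powLoopA n M ans times ht).2 ≤ n := by
  fun_induction powLoopA n M ans times ht with
  | case1 ans times ht h ih =>
    apply ih
    · omega
    · rw [PySem.Int.mod_eq_emod_of_pos hM]
      have h2 : (times * 2).toNat = times.toNat + times.toNat := by omega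
      rw [h2, pow_add, Int.mul_emod, hans, ← Int.mul_emod, Int.emod_emod_of_dvd _ dvd_rfl]
  | case2 ans times ht h =>
    exact ⟨hans, ht, hle⟩

lemma myPowA_spec (fuel : Nat) (x n M : Int)
    (memo : PySem.Dict (Int × Int × Int) Int) (hM : 0 < M) (hn : 0 ≤ n)
    (hfuel : n.toNat < fuel) (hg : GoodMemo memo) :
    (myPowA fuel x n M memo).1 % M = x ^ n.toNat % M ∧ GoodMemo (myPowA fuel x n M memo).2 := by
  induction fuel generalizing n memo with
  | zero => omega
  | succ fuel ih =>
    rw [myPowA]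
    by_cases h0 : n = 0
    · subst h0; simp
      exact hg
    · simp only [if_neg h0]
      cases hget : memo.get? (x, n, M) with
      | some v =>
        exact ⟨hg x n M v hget hn, hg⟩
      | none =>
        have hn1 : 1 ≤ n := by omega
        have hp := powLoopA_spec x n M x 1 (by norm_num) hM hn1 (by norm_num)
        set p := powLoopA n M x 1 (by norm_num) with hpdef
        obtain ⟨hp1, hp2, hp3⟩ := hp
        have hr := ih (n - p.2) memo (by omega) (by omega) hg
        set r := myPowA fuel x (n - p.2) M memo with hrdef
        obtain ⟨hr1, hr2⟩ := hr
        have hsum : p.2.toNat + (n - p.2).toNat = n.toNat := by omega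
        constructor
        · show (p.1 * r.1) % M = x ^ n.toNat % M
          rw [Int.mul_emod, hp1, hr1, ← Int.mul_emod, ← pow_add, hsum]
        · intro x' n' M' v hv hn'
          rw [PySem.Dict.get?_insert] at hv
          split at hv
          · rename_i heq
            obtain ⟨hx, hnn, hMM⟩ : x' = x ∧ n' = n ∧ M' = M := by
              simpa [Prod.ext_iff] using heq
            injection hv with hveq
            rw [hx, hnn, hMM, ← hveq]
            rw [Int.mul_emod, hp1, hr1, ← Int.mul_emod, ← pow_add, hsum]
          · exact hr2 x' n' M' v hv hn'

lemma pow2Table_spec (n : Nat) (M : Int) (hM1 : 1 < M) :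
    pow2Table n M = (List.range (n + 1)).map (fun k => (2 : Int) ^ k % M) := by
  have hM : 0 < M := by omega
  induction n with
  | zero =>
    simp [pow2Table, PySem.List.pyRange]
    rw [Int.emod_eq_of_lt (by norm_num) hM1]
  | succ n ih =>
    have hstep : PySem.List.pyRange 0 ((n : Int) + 1) 1 =
        PySem.List.pyRange 0 (n : Int) 1 ++ [(n : Int)] := by
      exact PySem.List.pyRange_one_succ_right (by omega)
    unfold pow2Table
    push_cast
    rw [hstep, List.foldl_append]
    unfold pow2Table at ih
    rw [ih]
    simp only [List.foldl_cons, List.foldl_nil]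
    conv_rhs => rw [List.range_succ, List.map_append]
    congr 1
    simp only [List.map_cons, List.map_nil]
    congr 1
    have hlen : ((List.range (n + 1)).map (fun k => (2 : Int) ^ k % M)).length = n + 1 := by
      simp
    have hlast : ((PySem.List.pyGet?
        ((List.range (n + 1)).map (fun k => (2 : Int) ^ k % M)) (-1)).getD 0)
        = (2 : Int) ^ n % M := by
      simp [PySem.List.pyGet?, PySem.List.pyIdx?, hlen]
    rw [hlast, PySem.Int.mod_eq_emod_of_pos hM, Int.mul_emod, Int.emod_emod_of_dvd _ dvd_rfl,
      ← Int.mul_emod, pow_succ]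

lemma loop_eq (nums : List Int) (target M : Int) (pow2 : List Int) (hM : 0 < M)
    (hpow : ∀ i : Int, 0 ≤ i → i < pow2.length → (PySem.List.pyGet? pow2 i).getD 0 = 2 ^ i.toNat % M) :
    ∀ (k : Nat) (left right ans ansB : Int) (memo : PySem.Dict (Int × Int × Int) Int),
      (right - left + 1).toNat ≤ k → GoodMemo memo → right - left + 1 < (pow2.length : Int) →
      ans % M = ansB % M → 0 ≤ ansB → ansB < M →
      PySem.Int.mod (loopA nums target M left right ans memo) M =
        loopB nums target M pow2 left right ansB := by
  intro k
  induction k with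
  | zero =>
    intro left right ans ansB memo hk hg hidx hcong hB0 hBM
    have hlr : ¬ left ≤ right := by omega
    rw [loopA, loopB]
    simp only [dif_neg hlr]
    rw [PySem.Int.mod_eq_emod_of_pos hM, hcong, Int.emod_eq_of_lt hB0 hBM]
  | succ k ih =>
    intro left right ans ansB memo hk hg hidx hcong hB0 hBM
    rw [loopA, loopB]
    by_cases hlr : left ≤ right
    · simp only [dif_pos hlr]
      by_cases hif : (PySem.List.pyGet? nums left).getD 0 +
          (PySem.List.pyGet? nums right).getD 0 ≤ target
      · simp only [if_pos hif]
        have hP := myPowA_spec ((right - left).toNat + 1) 2 (right - left) M memo hM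
          (by omega) (by omega) hg
        have hi : (PySem.List.pyGet? pow2 (right - left)).getD 0 = 2 ^ (right - left).toNat % M :=
          hpow (right - left) (by omega) (by omega)
        apply ih (left + 1) right _ _ _ (by omega) hP.2 (by omega)
        · rw [hi, PySem.Int.mod_eq_emod_of_pos hM, Int.emod_emod_of_dvd _ dvd_rfl,
            Int.add_emod ans, hcong, hP.1, Int.emod_add_emod]
        · rw [PySem.Int.mod_eq_emod_of_pos hM]; exact Int.emod_nonneg _ (by omega)
        · rw [PySem.Int.mod_eq_emod_of_pos hM]; exact Int.emod_lt_of_pos _ hM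
      · simp only [if_neg hif]
        exact ih left (right - 1) ans ansB memo (by omega) hg (by omega) hcong hB0 hBM
    · simp only [dif_neg hlr]
      rw [PySem.Int.mod_eq_emod_of_pos hM, hcong, Int.emod_eq_of_lt hB0 hBM]

-- ===== VERDICT (by name: the statement is the Claim_ definition above) =====
theorem numSubseq2_spec : Claim_equal_numSubseq2 := by
  intro nums target _
  unfold Spec_numSubseq2 numSubseq2 numSubseq2_alt
  have hM : (0 : Int) < 10 ^ 9 + 7 := by norm_num
  have hlen : (PySem.List.sorted nums (fun x => x) false).length = nums.length :=
    PySem.List.length_sorted nums _ _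
  have hpow : ∀ i : Int, 0 ≤ i →
      i < (pow2Table (PySem.List.sorted nums (fun x => x) false).length (10 ^ 9 + 7)).length →
      (PySem.List.pyGet?
        (pow2Table (PySem.List.sorted nums (fun x => x) false).length (10 ^ 9 + 7)) i).getD 0
        = 2 ^ i.toNat % (10 ^ 9 + 7) := by
    intro i h0 hi
    rw [pow2Table_spec _ _ (by norm_num)] at hi ⊢
    simp only [List.length_map, List.length_range] at hi
    have hcast : i = ((i.toNat : Nat) : Int) := by omega
    have hlt : i.toNat < ((List.range ((PySem.List.sorted nums (fun x => x) false).length + 1)).map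
        (fun k => (2 : Int) ^ k % (10 ^ 9 + 7))).length := by
      simp; omega
    conv_lhs => rw [hcast, PySem.List.pyGet?_natCast, List.getElem?_eq_getElem hlt]
    simp only [Option.getD_some, List.getElem_map, List.getElem_range]
  have hL : ((pow2Table (PySem.List.sorted nums (fun x => x) false).length (10 ^ 9 + 7)).length : Int)
      = (PySem.List.sorted nums (fun x => x) false).length + 1 := by
    rw [pow2Table_spec _ _ (by norm_num)]
    simp
  rw [hlen] at hpow hL
  show PySem.Int.mod (loopA (PySem.List.sorted nums (fun x => x) false) target (10 ^ 9 + 7)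
      0 ((nums.length : Int) - 1) 0 PySem.Dict.empty) (10 ^ 9 + 7) =
    loopB (PySem.List.sorted nums (fun x => x) false) target (10 ^ 9 + 7)
      (pow2Table (PySem.List.sorted nums (fun x => x) false).length (10 ^ 9 + 7)) 0
      (((PySem.List.sorted nums (fun x => x) false).length : Int) - 1) 0
  rw [hlen]
  exact loop_eq (PySem.List.sorted nums (fun x => x) false) target (10 ^ 9 + 7)
    (pow2Table nums.length (10 ^ 9 + 7)) hM hpow
    ((nums.length : Int) - 1 - 0 + 1).toNat 0 ((nums.length : Int) - 1) 0 0 PySem.Dict.empty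
    le_rfl goodMemo_empty (by rw [hL]; omega) rfl le_rfl hM
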